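-- pv_equiv track=rewrite | github.com/uklineale/cryptoPals | python/set2/thirteen.py | profile_for
-- ===== SOURCE A (Python) =====
-- def encode_cookie(dict):
--     decoded_str = ''
--
--     for i in dict.items():
--         decoded_str += i[0] + '=' + str(i[1]) + '&'
--
--     return decoded_str[0:-1]
--
-- def profile_for(email):
--     email = email.translate({ord(c) : None for c in '&='})
--     cookie = {
--         'email' : email,
--         'uid' : str(10),
--         'role' : 'user'
--     }
--
--     return encode_cookie(cookie)
-- ===== SOURCE B (Python) =====
-- def profile_for(email):
--     email = ''.join(c for c in email if c not in '&=')
--     return 'email=' + email + '&uid=10&role=user'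
-- ===== Notes on version B (the rewrite author's own statement) =====
-- stated objective: simpler
-- what changed: B drops the intermediate cookie dict, the items() accumulation loop and the trailing-ampersand slice, returning the fixed-layout cookie string directly after a single sanitizing filter pass.
import Mathlib
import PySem

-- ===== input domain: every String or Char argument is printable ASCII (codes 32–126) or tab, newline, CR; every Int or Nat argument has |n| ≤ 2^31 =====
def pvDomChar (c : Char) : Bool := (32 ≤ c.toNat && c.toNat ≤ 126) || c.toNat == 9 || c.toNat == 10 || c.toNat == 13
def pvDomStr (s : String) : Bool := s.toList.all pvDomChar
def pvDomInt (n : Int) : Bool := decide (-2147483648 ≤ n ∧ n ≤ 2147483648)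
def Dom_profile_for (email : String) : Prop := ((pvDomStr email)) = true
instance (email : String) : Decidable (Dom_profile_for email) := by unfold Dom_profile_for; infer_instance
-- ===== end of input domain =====

-- B replaces A's cookie dict + items() concatenation loop + trailing-'&' slice by the closed-form
-- string 'email=' ++ sanitized ++ '&uid=10&role=user' (simpler; return value only).

-- ===== PORT A =====
-- encode_cookie: fold over the dict's items appending 'k=v&', then the slice [0:-1]
def encode_cookie (d : PySem.Dict String String) : String :=
  let decoded := d.items.foldl
    (fun (acc : List Char) kv => acc ++ kv.1.toList ++ ['='] ++ kv.2.toList ++ ['&']) []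
  String.ofList (PySem.List.slice decoded (some 0) (some (-1)))

def profile_for (email : String) : String :=
  -- email.translate deleting every char of '&='
  let email' : String := String.ofList (email.toList.filter (fun c => !(c == '&' || c == '=')))
  let cookie : PySem.Dict String String :=
    (((PySem.Dict.empty).insert "email" email').insert "uid" (PySem.Int.toStr 10)).insert "role" "user"
  encode_cookie cookie

-- ===== PORT B =====
def profile_for_alt (email : String) : String :=
  String.ofList ("email=".toList ++ email.toList.filter (fun c => !(c == '&' || c == '=')) ++ "&uid=10&role=user".toList)

-- ===== PRECONDITION & SPEC =====
def Spec_profile_for (email : String) (out : String) : Prop := out = profile_for_alt email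
instance (email : String) (out : String) : Decidable (Spec_profile_for email out) := by unfold Spec_profile_for; infer_instance

-- ===== CLAIM (what is proved, stated in full; the proofs are below) =====
def Claim_equal_profile_for : Prop := ∀ (email : String), Dom_profile_for email → Spec_profile_for email (profile_for email)

-- ===== LEMMAS AND PROOFS =====

-- ===== VERDICT (by name: the statement is the Claim_ definition above) =====
theorem profile_for_spec : Claim_equal_profile_for := by
  intro email _
  unfold Spec_profile_for profile_for profile_for_alt encode_cookie
  have h10 : PySem.Int.toChars 10 = ['1','0'] := by decide
  simp [PySem.Dict.insert, PySem.Dict.empty, h10,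
        PySem.List.slice_zero_start, PySem.List.slice_to_neg_one,
        List.dropLast_append_of_ne_nil, List.dropLast_cons_of_ne_nil]
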